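-- pv_equiv track=rewrite | github.com/KacperKopiec/advent-of-code | 2024/day7/part1.py | all_possible
-- ===== SOURCE A (Python) =====
-- def all_possible(values):
--     res = []
--     for i in range(1 << (len(values) - 1)):
--         n = bin(i)[2:]
--         n = '0' * (len(values) - 1 - len(n)) + n
--         eq = values[0]
--         for i in range(len(n)):
--             match n[i]:
--                 case '0': eq += values[i + 1]
--                 case '1': eq *= values[i + 1]
--         res.append(eq)
--     return res
-- ===== SOURCE B (Python) =====
-- def all_possible(values):
--     res = [values[0]]
--     for v in values[1:]:
--         res = [r for p in res for r in (p + v, p * v)]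
--     return res
-- ===== Notes on version B (the rewrite author's own statement) =====
-- stated objective: faster
-- what changed: Instead of enumerating all 2^(n-1) operator bit-strings and re-evaluating each expression from scratch, B grows the list of partial results incrementally, doubling it with p+v and p*v for each new value.
import Mathlib
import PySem

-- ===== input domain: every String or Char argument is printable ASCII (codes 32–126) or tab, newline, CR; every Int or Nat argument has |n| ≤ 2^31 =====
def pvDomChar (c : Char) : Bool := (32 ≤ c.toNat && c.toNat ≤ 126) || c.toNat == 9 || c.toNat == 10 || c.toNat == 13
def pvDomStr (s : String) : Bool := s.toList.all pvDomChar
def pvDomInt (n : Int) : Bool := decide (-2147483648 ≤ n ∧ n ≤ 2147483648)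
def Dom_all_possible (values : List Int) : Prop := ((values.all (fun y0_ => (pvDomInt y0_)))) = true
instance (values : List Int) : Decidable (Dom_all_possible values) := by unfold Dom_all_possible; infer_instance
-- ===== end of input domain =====

-- B replaces A's per-bitmask re-evaluation by an incremental doubling of the partial-result
-- list (one +v / *v pair per new value), a different, intendedly faster algorithm.
-- ===== PORT A =====
-- helper: Python's bin(n)[2:] for n ≥ 1 (binary digits, most significant first)
def pyBinAux (n : Nat) : List Char :=
  if h : n = 0 then []
  else pyBinAux (n / 2) ++ [if n % 2 = 1 then '1' else '0']
  decreasing_by exact Nat.div_lt_self (Nat.pos_of_ne_zero h) (by omega)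

-- helper: Python's bin(n)[2:] for n ≥ 0 (bin(0)[2:] = "0")
def pyBin (n : Nat) : List Char := if n = 0 then ['0'] else pyBinAux n

def all_possible (values : List Int) : List Int :=
  (PySem.List.pyRange 0 ((2 ^ (values.length - 1) : Nat) : Int) 1).foldl (fun res i =>
    let n0 := pyBin i.toNat
    let n := List.replicate (values.length - 1 - n0.length) '0' ++ n0
    let eq := (PySem.List.enumerate n).foldl (fun eq ic =>
      if ic.2 = '0' then eq + PySem.List.pyGetD values (ic.1 + 1) 0
      else if ic.2 = '1' then eq * PySem.List.pyGetD values (ic.1 + 1) 0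
      else eq) (PySem.List.pyGetD values 0 0)
    res ++ [eq]) []

-- ===== PORT B =====
def all_possible_alt (values : List Int) : List Int :=
  match values with
  | [] => []
  | v0 :: rest => rest.foldl (fun res v => res.flatMap (fun p => [p + v, p * v])) [v0]

-- ===== PRECONDITION & SPEC =====
-- Pre_ excludes the empty list (A raises ValueError on the negative shift) and
-- single-element lists (A raises IndexError on values[1]).
def Pre_all_possible (values : List Int) : Prop := 2 ≤ values.length
instance (values : List Int) : Decidable (Pre_all_possible values) := by unfold Pre_all_possible; infer_instance
def pvWitness_all_possible : List Int := ([1, 2])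

def Spec_all_possible (values : List Int) (out : List Int) : Prop := out = all_possible_alt values
instance (values : List Int) (out : List Int) : Decidable (Spec_all_possible values out) := by unfold Spec_all_possible; infer_instance

-- ===== CLAIM (what is proved, stated in full; the proofs are below) =====
def Claim_equal_all_possible : Prop := ∀ (values : List Int), Dom_all_possible values → Pre_all_possible values → Spec_all_possible values (all_possible values)

-- ===== LEMMAS AND PROOFS =====

-- left-to-right evaluation of v0 (op c) v over a bit-char/value pair list
def evalZ (a : Int) (l : List (Char × Int)) : Int :=
  l.foldl (fun eq cv => if cv.1 = '0' then eq + cv.2 else if cv.1 = '1' then eq * cv.2 else eq) a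

-- the k-digit zero-padded binary representation, recursively
def bitsRec : Nat → Nat → List Char
  | 0, _ => []
  | k+1, i => bitsRec k (i / 2) ++ [if i % 2 = 1 then '1' else '0']

theorem length_bitsRec (k i : Nat) : (bitsRec k i).length = k := by
  induction k generalizing i with
  | zero => rfl
  | succ k ih => simp [bitsRec, ih]

theorem bitsRec_zero (k : Nat) : bitsRec k 0 = List.replicate k '0' := by
  induction k with
  | zero => rfl
  | succ k ih => simp [bitsRec, ih, List.replicate_succ']

theorem padded_eq_bitsRec (k i : Nat) (hk : 1 ≤ k) (hi : i < 2 ^ k) :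
    List.replicate (k - (pyBin i).length) '0' ++ pyBin i = bitsRec k i := by
  induction k generalizing i with
  | zero => omega
  | succ k ih =>
    by_cases h2 : i < 2
    · interval_cases i
      · simp [pyBin, bitsRec, bitsRec_zero]
      · simp [pyBin, pyBinAux, bitsRec, bitsRec_zero]
    · have hi0 : i ≠ 0 := by omega
      have hq0 : i / 2 ≠ 0 := by omega
      have hpb : pyBin i = pyBin (i / 2) ++ [if i % 2 = 1 then '1' else '0'] := by
        rw [pyBin, pyBin, if_neg hi0, if_neg hq0, pyBinAux, dif_neg hi0]
      have hk1 : 1 ≤ k := by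
        by_contra h
        have : k = 0 := by omega
        subst this
        omega
      have hq : i / 2 < 2 ^ k := Nat.div_lt_of_lt_mul (by
        have h21 : (2:Nat) ^ (k+1) = 2 ^ k * 2 := by ring
        omega)
      have := ih (i / 2) hk1 hq
      rw [hpb, bitsRec]
      simp only [List.length_append, List.length_singleton]
      rw [show k + 1 - ((pyBin (i / 2)).length + 1) = k - (pyBin (i / 2)).length by omega,
        ← List.append_assoc, this]

theorem bitsRec_double (k j b : Nat) (hb : b < 2) :
    bitsRec (k + 1) (2 * j + b) = bitsRec k j ++ [if b = 1 then '1' else '0'] := by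
  have h1 : (2 * j + b) / 2 = j := by omega
  have h2 : (2 * j + b) % 2 = b := by omega
  rw [bitsRec, h1, h2]

theorem pvRangeTwoMul (m : Nat) :
    List.range (2 * m) = (List.range m).flatMap (fun j => [2 * j, 2 * j + 1]) := by
  induction m with
  | zero => rfl
  | succ m ih =>
    rw [show 2 * (m + 1) = (2 * m + 1) + 1 by ring, List.range_succ, List.range_succ,
      List.range_succ, ih]
    simp

theorem inner_eq (cs : List Char) (v0 : Int) (rest : List Int) (s : Nat) (a : Int)
    (h : s + cs.length ≤ rest.length) :
    (PySem.List.enumerate cs (s : Int)).foldl (fun eq ic =>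
      if ic.2 = '0' then eq + PySem.List.pyGetD (v0 :: rest) (ic.1 + 1) 0
      else if ic.2 = '1' then eq * PySem.List.pyGetD (v0 :: rest) (ic.1 + 1) 0
      else eq) a = evalZ a (cs.zip (rest.drop s)) := by
  induction cs generalizing s a with
  | nil => simp [PySem.List.enumerate_nil, evalZ]
  | cons c cs ih =>
    have hs : s < rest.length := by simp at h; omega
    have hget : PySem.List.pyGetD (v0 :: rest) ((s : Int) + 1) 0 = rest[s] := by
      have : ((s : Int) + 1) = ((s + 1 : Nat) : Int) := by push_cast; ring
      rw [this, PySem.List.pyGetD_natCast]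
      simp [List.getD, List.getElem?_cons_succ, List.getElem?_eq_getElem hs]
    have hdrop : rest.drop s = rest[s] :: rest.drop (s + 1) := List.drop_eq_getElem_cons hs
    have hcast : (s : Int) + 1 = ((s + 1 : Nat) : Int) := by push_cast; ring
    rw [PySem.List.enumerate_cons, List.foldl_cons, hget, hcast,
      ih (s + 1) _ (by simp at h ⊢; omega), hdrop, List.zip_cons_cons]
    simp [evalZ]

theorem evalZ_append (a : Int) (l : List (Char × Int)) (x : Char × Int) :
    evalZ a (l ++ [x]) =
      (if x.1 = '0' then evalZ a l + x.2 else if x.1 = '1' then evalZ a l * x.2 else evalZ a l) := by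
  simp only [evalZ, List.foldl_append, List.foldl_cons, List.foldl_nil]

theorem inner_eq0 (cs : List Char) (v0 : Int) (rest : List Int) (a : Int)
    (h : cs.length ≤ rest.length) :
    (PySem.List.enumerate cs 0).foldl (fun eq ic =>
      if ic.2 = '0' then eq + PySem.List.pyGetD (v0 :: rest) (ic.1 + 1) 0
      else if ic.2 = '1' then eq * PySem.List.pyGetD (v0 :: rest) (ic.1 + 1) 0
      else eq) a = evalZ a (cs.zip rest) := by
  have := inner_eq cs v0 rest 0 a (by omega)
  simpa using this

theorem A_char (v0 : Int) (rest : List Int) :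
    all_possible (v0 :: rest) =
      (List.range (2 ^ rest.length)).map (fun i => evalZ v0 ((bitsRec rest.length i).zip rest)) := by
  rcases rest with _ | ⟨r, rs⟩
  · have h1 : ((2 ^ (([v0] : List Int).length - 1) : Nat) : Int) = ((1 : Nat) : Int) := by norm_num
    rw [all_possible, h1, PySem.List.pyRange_zero_nat]
    have hp : pyBin 0 = ['0'] := rfl
    norm_num [hp, evalZ, bitsRec, PySem.List.enumerate_cons, PySem.List.enumerate_nil,
      PySem.List.pyGetD, PySem.List.pyGet?, PySem.List.pyIdx?]
  · have hlen : (v0 :: r :: rs).length - 1 = (r :: rs).length := by simp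
    have h2 : ((2 ^ ((v0 :: r :: rs).length - 1) : Nat) : Int) =
        ((2 ^ (r :: rs).length : Nat) : Int) := by rw [hlen]
    rw [all_possible, h2, PySem.List.pyRange_zero_nat,
      PySem.List.foldl_append_singleton_eq_map, List.nil_append, List.map_map]
    refine List.map_congr_left (fun i hi => ?_)
    have hilt : i < 2 ^ (r :: rs).length := List.mem_range.mp hi
    simp only [Function.comp_apply, Int.toNat_natCast, hlen]
    rw [padded_eq_bitsRec (r :: rs).length i (by simp) hilt]
    rw [inner_eq0 _ v0 (r :: rs) _ (by simp [length_bitsRec])]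
    rw [PySem.List.pyGetD_zero_cons]

theorem A_eq_B (rest : List Int) (v0 : Int) :
    all_possible (v0 :: rest) = all_possible_alt (v0 :: rest) := by
  induction rest using List.reverseRecOn with
  | nil => rw [A_char]; simp [all_possible_alt, evalZ, bitsRec]
  | append_singleton rs v ih =>
    have halt : all_possible_alt (v0 :: (rs ++ [v])) =
        (all_possible_alt (v0 :: rs)).flatMap (fun p => [p + v, p * v]) := by
      simp [all_possible_alt, List.foldl_append]
    rw [A_char, halt, ← ih, A_char, List.flatMap_map]
    have hlen : (rs ++ [v]).length = rs.length + 1 := by simp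
    rw [hlen]
    have hpow : (2 : Nat) ^ (rs.length + 1) = 2 * 2 ^ rs.length := by ring
    rw [hpow, pvRangeTwoMul, List.map_flatMap, List.flatMap_def, List.flatMap_def]
    refine congrArg List.flatten (List.map_congr_left fun j hj => ?_)
    have hz : (bitsRec rs.length j).length = rs.length := length_bitsRec _ _
    have hb0 : bitsRec (rs.length + 1) (2 * j) = bitsRec rs.length j ++ ['0'] := by
      simpa using bitsRec_double rs.length j 0 (by omega)
    have hb1 : bitsRec (rs.length + 1) (2 * j + 1) = bitsRec rs.length j ++ ['1'] := by
      simpa using bitsRec_double rs.length j 1 (by omega)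
    simp only [List.map_cons, List.map_nil, hb0, hb1, List.zip_append hz,
      List.zip_cons_cons, List.zip_nil_right, evalZ_append]
    simp

-- ===== VERDICT (by name: the statement is the Claim_ definition above) =====
theorem all_possible_spec : Claim_equal_all_possible := by
  intro values _ hpre
  match values with
  | v0 :: rest => exact A_eq_B rest v0
  | [] => simp [Pre_all_possible] at hpre
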